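-- pv_equiv track=rewrite | github.com/james-wallis/blockbreaker | blockbreaker.py | findHighScore
-- ===== SOURCE A (Python) =====
-- def findHighScore(findHighScoreList):
--     entriesInList = 0
--     #('-inf') is infinity
--     numberOne = numberTwo = float('-inf')
--     for highestNumber in findHighScoreList:
--         entriesInList += 1
--         if highestNumber > numberTwo:
--             if highestNumber >= numberOne:
--                 numberOne, numberTwo = highestNumber, numberOne
--             else:
--                 numberTwo = highestNumber
--     if entriesInList >= 2:
--         findHighScoreList.remove(numberTwo)
--         return numberTwo, findHighScoreList
--     else:
--         return False, findHighScoreList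
-- ===== SOURCE B (Python) =====
-- def findHighScore(findHighScoreList):
--     if len(findHighScoreList) < 2:
--         return False, findHighScoreList
--     numberTwo = sorted(findHighScoreList, reverse=True)[1]
--     findHighScoreList.remove(numberTwo)
--     return numberTwo, findHighScoreList
-- ===== Notes on version B (the rewrite author's own statement) =====
-- stated objective: simpler
-- what changed: Replaces the hand-rolled single-pass running top-two tracker (with a float('-inf') sentinel) by sort-descending-and-take-index-1, keeping the same first-occurrence remove and return contract.
-- outside the precondition, e.g. on findHighScore([5]): A returns (False, [5]), B returns (False, [5])
import Mathlib
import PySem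

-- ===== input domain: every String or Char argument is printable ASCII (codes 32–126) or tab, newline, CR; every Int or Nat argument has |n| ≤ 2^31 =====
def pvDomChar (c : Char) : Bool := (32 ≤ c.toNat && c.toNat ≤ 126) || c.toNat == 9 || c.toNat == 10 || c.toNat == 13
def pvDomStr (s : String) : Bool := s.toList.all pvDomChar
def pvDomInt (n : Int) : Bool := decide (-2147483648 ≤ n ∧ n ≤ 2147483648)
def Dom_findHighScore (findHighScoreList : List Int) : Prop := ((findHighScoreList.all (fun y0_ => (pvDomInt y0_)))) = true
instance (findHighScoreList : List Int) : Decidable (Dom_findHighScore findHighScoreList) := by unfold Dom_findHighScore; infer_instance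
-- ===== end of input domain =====

-- B replaces A's one-pass running top-two tracker by sort-descending-then-take-index-1 (objective: simpler).
-- Both Pythons mutate the argument in place via .remove; the equivalence proved here is about the return value.

-- ===== PORT A =====
-- A's float('-inf') sentinel is ported as `none` (Option Int); `.getD 0` below is only
-- reached when entriesInList ≥ 2, where the second-max is never the sentinel.
def findHighScoreStep (st : Int × Option Int × Option Int) (h : Int) : Int × Option Int × Option Int :=
  let n := st.1 + 1
  let one := st.2.1
  let two := st.2.2
  if (match two with | none => true | some t => decide (t < h)) then
    if (match one with | none => true | some o => decide (o ≤ h)) then (n, some h, one)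
    else (n, one, some h)
  else (n, one, two)

def findHighScore (findHighScoreList : List Int) : Int × List Int :=
  let st := findHighScoreList.foldl findHighScoreStep (0, none, none)
  if st.1 ≥ 2 then
    let two := st.2.2.getD 0
    (two, (PySem.List.remove? findHighScoreList two).getD findHighScoreList)
  else
    (0, findHighScoreList)  -- Python returns (False, list) here: outside Pre_

-- ===== PORT B =====
def findHighScore_alt (findHighScoreList : List Int) : Int × List Int :=
  if findHighScoreList.length < 2 then
    (0, findHighScoreList)  -- Python returns (False, list) here: outside Pre_
  else
    let numberTwo := PySem.List.pyGetD (PySem.List.sorted findHighScoreList (fun x => x) true) 1 0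
    (numberTwo, (PySem.List.remove? findHighScoreList numberTwo).getD findHighScoreList)

-- ===== PRECONDITION & SPEC =====
-- Pre_ excludes lists with fewer than 2 elements, on which Python A (and B) return the
-- bool False as the first component, which is not a value of the declared type Int.
def Pre_findHighScore (findHighScoreList : List Int) : Prop := 2 ≤ findHighScoreList.length
instance (findHighScoreList : List Int) : Decidable (Pre_findHighScore findHighScoreList) := by unfold Pre_findHighScore; infer_instance
def pvWitness_findHighScore : List Int := [3, 7, 7, -2]

def Spec_findHighScore (findHighScoreList : List Int) (out : Int × List Int) : Prop := out = findHighScore_alt findHighScoreList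
instance (findHighScoreList : List Int) (out : Int × List Int) : Decidable (Spec_findHighScore findHighScoreList out) := by unfold Spec_findHighScore; infer_instance

-- ===== CLAIM (what is proved, stated in full; the proofs are below) =====
def Claim_equal_findHighScore : Prop := ∀ (findHighScoreList : List Int), Dom_findHighScore findHighScoreList → Pre_findHighScore findHighScoreList → Spec_findHighScore findHighScoreList (findHighScore findHighScoreList)

-- ===== LEMMAS AND PROOFS =====

-- the second-largest value of a list (counting duplicates): max of the list with one max removed
def pvSecond (l : List Int) : Option Int :=
  match l.max? with
  | none => none
  | some m => (l.erase m).max?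

theorem pv_max?_eq (l : List Int) (m : Int) (hmem : m ∈ l) (hub : ∀ b ∈ l, b ≤ m) :
    l.max? = some m := List.max?_eq_some_iff.mpr ⟨hmem, hub⟩

theorem pv_second_eq (l : List Int) (m s : Int) (hmax : l.max? = some m)
    (hmem : s ∈ l.erase m) (hub : ∀ b ∈ l.erase m, b ≤ s) :
    pvSecond l = some s := by
  simp only [pvSecond, hmax]
  exact pv_max?_eq _ _ hmem hub

theorem pv_step_append (l : List Int) (h : Int) (n : Int) :
    findHighScoreStep (n, l.max?, pvSecond l) h = (n + 1, (l ++ [h]).max?, pvSecond (l ++ [h])) := by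
  rcases hm : l.max? with _ | m
  · have hl : l = [] := List.max?_eq_none_iff.mp hm
    subst hl
    simp [findHighScoreStep, pvSecond]
  · have ⟨hmem, hub⟩ := List.max?_eq_some_iff.mp hm
    rcases h2 : (l.erase m).max? with _ | m2
    · -- l is the one-element list [m]
      have he : l.erase m = [] := List.max?_eq_none_iff.mp h2
      have hpos : 0 < l.length := List.length_pos_of_mem hmem
      have hlen : l.length = 1 := by
        have h3 := List.length_erase_of_mem hmem
        rw [he] at h3; simp at h3; omega
      have hl : l = [m] := by rcases l with _ | ⟨x, t⟩ <;> simp_all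
      subst hl
      have hpsl : pvSecond [m] = none := by simp only [pvSecond, hm, h2]
      by_cases hmh : m ≤ h
      · have hmax : ([m] ++ [h]).max? = some h := by
          apply pv_max?_eq _ _ (by simp)
          intro b hb; simp at hb; rcases hb with rfl | rfl <;> omega
        have hsec : pvSecond ([m] ++ [h]) = some m := by
          apply pv_second_eq _ h _ hmax
          · by_cases hme : m = h <;> simp [hme]
          · intro b hb
            by_cases hme : m = h <;> simp [hme] at hb <;> omega
        rw [hpsl, hmax, hsec]
        simp [findHighScoreStep, hmh]
      · have hmax : ([m] ++ [h]).max? = some m := by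
          apply pv_max?_eq _ _ (by simp)
          intro b hb; simp at hb; rcases hb with rfl | rfl <;> omega
        have hsec : pvSecond ([m] ++ [h]) = some h := by
          apply pv_second_eq _ m _ hmax
          · simp
          · intro b hb; simp at hb; omega
        rw [hpsl, hmax, hsec]
        simp [findHighScoreStep, hmh]
    · have ⟨hmem2, hub2⟩ := List.max?_eq_some_iff.mp h2
      have hm2m : m2 ≤ m := hub _ (List.mem_of_mem_erase hmem2)
      have hpsl : pvSecond l = some m2 := by simp only [pvSecond, hm, h2]
      by_cases hh1 : m2 < h
      · by_cases hh2 : m ≤ h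
        · have hmax : (l ++ [h]).max? = some h := by
            apply pv_max?_eq _ _ (by simp)
            intro b hb; rcases List.mem_append.mp hb with hb | hb
            · exact le_trans (hub _ hb) hh2
            · simp at hb; omega
          have hsec : pvSecond (l ++ [h]) = some m := by
            apply pv_second_eq _ h _ hmax
            · by_cases hhm : h = m
              · subst hhm; rw [List.erase_append_left _ hmem]; simp
              · have hnl : h ∉ l := fun hc => hhm (le_antisymm (hub _ hc) hh2)
                rw [List.erase_append_right _ hnl]; simp [hmem]
            · by_cases hhm : h = m
              · subst hhm; rw [List.erase_append_left _ hmem]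
                intro b hb; rcases List.mem_append.mp hb with hb | hb
                · exact le_trans (hub2 _ hb) hm2m
                · simp at hb; omega
              · have hnl : h ∉ l := fun hc => hhm (le_antisymm (hub _ hc) hh2)
                rw [List.erase_append_right _ hnl]
                intro b hb; simp at hb
                exact hub _ hb
          rw [hpsl, hmax, hsec]
          simp [findHighScoreStep, hh1, hh2]
        · have hmax : (l ++ [h]).max? = some m := by
            apply pv_max?_eq _ _ (by simp [hmem])
            intro b hb; rcases List.mem_append.mp hb with hb | hb
            · exact hub _ hb
            · simp at hb; omega
          have hsec : pvSecond (l ++ [h]) = some h := by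
            apply pv_second_eq _ m _ hmax
            · rw [List.erase_append_left _ hmem]; simp
            · rw [List.erase_append_left _ hmem]
              intro b hb; rcases List.mem_append.mp hb with hb | hb
              · have := hub2 _ hb; omega
              · simp at hb; omega
          rw [hpsl, hmax, hsec]
          simp [findHighScoreStep, hh1, hh2]
      · have hmax : (l ++ [h]).max? = some m := by
          apply pv_max?_eq _ _ (by simp [hmem])
          intro b hb; rcases List.mem_append.mp hb with hb | hb
          · exact hub _ hb
          · simp at hb; omega
        have hsec : pvSecond (l ++ [h]) = some m2 := by
          apply pv_second_eq _ m _ hmax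
          · rw [List.erase_append_left _ hmem]; simp [hmem2]
          · rw [List.erase_append_left _ hmem]
            intro b hb; rcases List.mem_append.mp hb with hb | hb
            · exact hub2 _ hb
            · simp at hb; omega
        rw [hpsl, hmax, hsec]
        simp [findHighScoreStep, hh1]

theorem pv_fold_spec (l : List Int) :
    l.foldl findHighScoreStep (0, none, none) = ((l.length : Int), l.max?, pvSecond l) := by
  induction l using List.reverseRecOn with
  | nil => simp [pvSecond]
  | append_singleton l h ih =>
      rw [List.foldl_append, ih]
      simp only [List.foldl_cons, List.foldl_nil]
      rw [pv_step_append]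
      simp

theorem pv_sorted_top2 (l : List Int) (a b : Int) (t : List Int)
    (hs : PySem.List.sorted l (fun x => x) true = a :: b :: t) :
    l.max? = some a ∧ pvSecond l = some b := by
  have hperm : (a :: b :: t).Perm l := hs ▸ PySem.List.sorted_perm l (fun x => x) true
  have hpw : (a :: b :: t).Pairwise (fun x y => y ≤ x) := by
    have := PySem.List.sorted_pairwise_rev (xs := l) (key := fun x => x)
    rwa [hs] at this
  rw [List.pairwise_cons] at hpw
  obtain ⟨ha, hpw2⟩ := hpw
  rw [List.pairwise_cons] at hpw2
  obtain ⟨hb, _⟩ := hpw2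
  have hmax : l.max? = some a := by
    apply pv_max?_eq _ _ (hperm.mem_iff.mp (by simp))
    intro x hx
    rcases List.mem_cons.mp (hperm.mem_iff.mpr hx) with rfl | h
    · exact le_refl _
    · exact ha _ h
  refine ⟨hmax, ?_⟩
  have hep : (l.erase a).Perm (b :: t) := by
    have := (hperm.symm.erase a)
    simpa using this
  apply pv_second_eq _ a _ hmax
  · exact hep.mem_iff.mpr (by simp)
  · intro x hx
    rcases List.mem_cons.mp (hep.mem_iff.mp hx) with rfl | h
    · exact le_refl _
    · exact hb _ h

theorem findHighScore_top2 (xs : List Int) (hpre : 2 ≤ xs.length) :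
    ∃ a b t, PySem.List.sorted xs (fun x => x) true = a :: b :: t := by
  have hlen : (PySem.List.sorted xs (fun x => x) true).length = xs.length :=
    PySem.List.length_sorted xs (fun x => x) true
  rcases hs : PySem.List.sorted xs (fun x => x) true with _ | ⟨a, _ | ⟨b, t⟩⟩ <;>
    rw [hs] at hlen <;> simp at hlen
  · omega
  · omega
  · exact ⟨a, b, t, rfl⟩

-- ===== VERDICT (by name: the statement is the Claim_ definition above) =====
theorem findHighScore_spec : Claim_equal_findHighScore := by
  intro xs _ hpre
  have hpre' : 2 ≤ xs.length := hpre
  obtain ⟨a, b, t, hs⟩ := findHighScore_top2 xs hpre'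
  obtain ⟨hmax, hsec⟩ := pv_sorted_top2 xs a b t hs
  unfold Spec_findHighScore findHighScore findHighScore_alt
  rw [pv_fold_spec, hmax, hsec, hs]
  have h2 : ¬ xs.length < 2 := by omega
  have h2' : (2:Int) ≤ (xs.length : Int) := by exact_mod_cast hpre'
  simp only [h2, if_false, ge_iff_le]
  rw [if_pos h2']
  simp [PySem.List.pyGetD_ofNat']
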